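-- pv_equiv track=rewrite | github.com/NesrineGhannay/SAT-CSP-Solver | src/SAT/schur_problem_sat.py | generate_schur_sat_instance
-- ===== SOURCE A (Python) =====
-- def generate_schur_sat_instance(k, n):
--     """
--     Génère une instance de problème Schur SAT sous forme de clauses.
--
--     :param k: Nombre de boîtes
--     :param n: Nombre de balles
--     :return: Clauses au format CNF
--     """
--     clauses = ""
--
--     for i in range(1, n + 1):
--         for j in range(i + 1, n + 1):
--             for l in range(j + 1, n + 1):
--                 if i + j == l:
--                     for m in range(1, k + 1):
--                         clauses += str(formeInjective(-i, -m, k)) + " " + str(formeInjective(-j, -m, k)) + " " + str(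
--                             formeInjective(-l, -m, k)) + " 0\n"
--
--     for i in range(1, n + 1):
--         clause = ""
--         for j in range(1, k + 1):
--             clause += str(formeInjective(i, j, k)) + " "
--         clauses += clause + "0\n"
--
--     for i in range(1, n + 1):
--         for j in range(1, k + 1):
--             for l in range(j + 1, k + 1):
--                 clauses += str(-formeInjective(i, j, k)) + " " + str(-formeInjective(i, l, k)) + " 0\n"
--     return clauses
--
-- def formeInjective(i, j, nbBoxes):
--     """
--     Fonction pour convertir la paire (i, j) en un littéral unique pour le problème SAT.
--
--     :param i: Indice de la balle
--     :param j: Indice de la boîte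
--     :param nbBoxes: Nombre total de boîtes
--     :return: Littéral unique
--     """
--     if i < 0:
--         i = abs(i)
--         j = abs(j)
--         return -1 * ((nbBoxes * (i - 1)) + j)  # -(i, j) --> -((k*i-1) +j)
--     else:
--         return (nbBoxes * (i - 1)) + j  # (i, j) --> (k*i-1) +j
-- ===== SOURCE B (Python) =====
-- def generate_schur_sat_instance(k, n):
--     """
--     Génère une instance de problème Schur SAT sous forme de clauses.
--
--     :param k: Nombre de boîtes
--     :param n: Nombre de balles
--     :return: Clauses au format CNF
--     """
--     def lit(i, j):
--         return k * (i - 1) + j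
--
--     out = []
--     # Schur triples: l = i + j computed directly instead of scanning all l.
--     for i in range(1, n + 1):
--         for j in range(i + 1, n + 1 - i):
--             for m in range(1, k + 1):
--                 out.append("%d %d %d 0\n" % (-lit(i, m), -lit(j, m), -lit(i + j, m)))
--     # Every ball is in at least one box.
--     for i in range(1, n + 1):
--         out.append(" ".join([str(lit(i, j)) for j in range(1, k + 1)] + ["0"]) + "\n")
--     # Every ball is in at most one box.
--     for i in range(1, n + 1):
--         for j in range(1, k + 1):
--             for l in range(j + 1, k + 1):
--                 out.append("%d %d 0\n" % (-lit(i, j), -lit(i, l)))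
--     return "".join(out)
-- ===== Notes on version B (the rewrite author's own statement) =====
-- stated objective: alternative
-- what changed: B computes the Schur-triple partner l = i + j directly (iterating j only up to n - i) instead of A's innermost scan over all l with an i+j==l test, and assembles the CNF text as a joined list of clause strings instead of repeated string +=.
import Mathlib
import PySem

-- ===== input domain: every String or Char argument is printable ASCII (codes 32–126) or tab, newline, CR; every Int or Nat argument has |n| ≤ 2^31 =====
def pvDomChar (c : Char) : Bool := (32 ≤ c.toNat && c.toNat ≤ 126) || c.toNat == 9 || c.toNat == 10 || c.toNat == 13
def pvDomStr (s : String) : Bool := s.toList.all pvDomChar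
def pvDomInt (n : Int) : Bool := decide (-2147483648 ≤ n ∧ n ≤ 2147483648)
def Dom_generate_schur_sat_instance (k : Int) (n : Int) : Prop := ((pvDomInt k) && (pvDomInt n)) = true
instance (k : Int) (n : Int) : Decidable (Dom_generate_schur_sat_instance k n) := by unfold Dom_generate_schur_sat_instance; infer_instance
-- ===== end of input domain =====

-- B computes the Schur-triple partner l = i + j directly instead of A's innermost scan over all
-- l with an i+j==l test, and builds the CNF text as a joined list of clause strings instead of
-- repeated string +=.

-- ===== PORT A =====
def formeInjective (i : Int) (j : Int) (nbBoxes : Int) : Int :=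
  if i < 0 then
    (let i := abs i; let j := abs j; -1 * ((nbBoxes * (i - 1)) + j))
  else
    (nbBoxes * (i - 1)) + j

def generate_schur_sat_instance (k : Int) (n : Int) : String :=
  let clauses : String := ""
  let clauses := (PySem.List.pyRange 1 (n + 1) 1).foldl (fun clauses i =>
    (PySem.List.pyRange (i + 1) (n + 1) 1).foldl (fun clauses j =>
      (PySem.List.pyRange (j + 1) (n + 1) 1).foldl (fun clauses l =>
        if i + j == l then
          (PySem.List.pyRange 1 (k + 1) 1).foldl (fun clauses m =>
            clauses ++ PySem.Int.toStr (formeInjective (-i) (-m) k) ++ " " ++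
              PySem.Int.toStr (formeInjective (-j) (-m) k) ++ " " ++
              PySem.Int.toStr (formeInjective (-l) (-m) k) ++ " 0\n") clauses
        else clauses) clauses) clauses) clauses
  let clauses := (PySem.List.pyRange 1 (n + 1) 1).foldl (fun clauses i =>
    let clause : String := ""
    let clause := (PySem.List.pyRange 1 (k + 1) 1).foldl (fun clause j =>
      clause ++ PySem.Int.toStr (formeInjective i j k) ++ " ") clause
    clauses ++ clause ++ "0\n") clauses
  let clauses := (PySem.List.pyRange 1 (n + 1) 1).foldl (fun clauses i =>
    (PySem.List.pyRange 1 (k + 1) 1).foldl (fun clauses j =>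
      (PySem.List.pyRange (j + 1) (k + 1) 1).foldl (fun clauses l =>
        clauses ++ PySem.Int.toStr (-formeInjective i j k) ++ " " ++
          PySem.Int.toStr (-formeInjective i l k) ++ " 0\n") clauses) clauses) clauses
  clauses

-- ===== PORT B =====
def schurLit (k : Int) (i : Int) (j : Int) : Int := k * (i - 1) + j

def generate_schur_sat_instance_alt (k : Int) (n : Int) : String :=
  let out : List String := []
  -- Schur triples: l = i + j computed directly instead of scanning all l.
  let out := (PySem.List.pyRange 1 (n + 1) 1).foldl (fun out i =>
    (PySem.List.pyRange (i + 1) (n + 1 - i) 1).foldl (fun out j =>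
      (PySem.List.pyRange 1 (k + 1) 1).foldl (fun out m =>
        out ++ [PySem.Int.toStr (-(schurLit k i m)) ++ " " ++
          PySem.Int.toStr (-(schurLit k j m)) ++ " " ++
          PySem.Int.toStr (-(schurLit k (i + j) m)) ++ " 0\n"]) out) out) out
  -- Every ball is in at least one box.
  let out := (PySem.List.pyRange 1 (n + 1) 1).foldl (fun out i =>
    out ++ [PySem.Str.join " "
      (((PySem.List.pyRange 1 (k + 1) 1).map (fun j => PySem.Int.toStr (schurLit k i j))) ++ ["0"]) ++ "\n"]) out
  -- Every ball is in at most one box.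
  let out := (PySem.List.pyRange 1 (n + 1) 1).foldl (fun out i =>
    (PySem.List.pyRange 1 (k + 1) 1).foldl (fun out j =>
      (PySem.List.pyRange (j + 1) (k + 1) 1).foldl (fun out l =>
        out ++ [PySem.Int.toStr (-(schurLit k i j)) ++ " " ++
          PySem.Int.toStr (-(schurLit k i l)) ++ " 0\n"]) out) out) out
  PySem.Str.join "" out

-- ===== PRECONDITION & SPEC =====
def Spec_generate_schur_sat_instance (k : Int) (n : Int) (out : String) : Prop := out = generate_schur_sat_instance_alt k n
instance (k : Int) (n : Int) (out : String) : Decidable (Spec_generate_schur_sat_instance k n out) := by unfold Spec_generate_schur_sat_instance; infer_instance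

-- ===== CLAIM (what is proved, stated in full; the proofs are below) =====
def Claim_equal_generate_schur_sat_instance : Prop := ∀ (k : Int) (n : Int), Dom_generate_schur_sat_instance k n → Spec_generate_schur_sat_instance k n (generate_schur_sat_instance k n)

-- ===== LEMMAS AND PROOFS =====

-- String-concatenation helper and generic loop-shape lemmas used by the proof.
def pvCat (l : List String) : String := l.foldl (· ++ ·) ""

theorem pvFoldl_sapp (l : List String) (s : String) : l.foldl (· ++ ·) s = s ++ pvCat l := by
  induction l generalizing s with
  | nil => simp [pvCat]
  | cons a t ih =>
    simp only [pvCat, List.foldl_cons]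
    rw [ih (s ++ a), ih ("" ++ a), String.empty_append, String.append_assoc]

theorem pvCat_cons (x : String) (t : List String) : pvCat (x :: t) = x ++ pvCat t := by
  simp only [pvCat, List.foldl_cons]
  rw [pvFoldl_sapp, String.empty_append]; rfl

theorem pvCat_append (l m : List String) : pvCat (l ++ m) = pvCat l ++ pvCat m := by
  induction l with
  | nil => simp [pvCat]
  | cons a t ih => simp only [List.cons_append, pvCat_cons, ih, String.append_assoc]

theorem pvCat_flatMap {α : Type} (l : List α) (g : α → List String) :
    pvCat (l.flatMap g) = pvCat (l.map (fun x => pvCat (g x))) := by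
  induction l with
  | nil => rfl
  | cons a t ih => simp only [List.flatMap_cons, List.map_cons, pvCat_append, pvCat_cons, ih]

theorem pvStrfold_shape {α : Type} (l : List α) (g : α → String) (f : String → α → String)
    (h : ∀ s x, x ∈ l → f s x = s ++ g x) : ∀ s, l.foldl f s = s ++ pvCat (l.map g) := by
  induction l with
  | nil => intro s; simp [pvCat]
  | cons a t ih =>
    intro s
    rw [List.foldl_cons, h s a (List.mem_cons_self), ih (fun s x hx => h s x (List.mem_cons_of_mem _ hx)),
      List.map_cons, pvCat_cons, String.append_assoc]

theorem pvListfold_shape {α β : Type} (l : List α) (g : α → List β) (f : List β → α → List β)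
    (h : ∀ s x, x ∈ l → f s x = s ++ g x) : ∀ s, l.foldl f s = s ++ l.flatMap g := by
  induction l with
  | nil => intro s; simp
  | cons a t ih =>
    intro s
    rw [List.foldl_cons, h s a (List.mem_cons_self), ih (fun s x hx => h s x (List.mem_cons_of_mem _ hx)),
      List.flatMap_cons, List.append_assoc]

theorem pvJoin_empty_eq_cat (l : List String) : PySem.Str.join "" l = pvCat l := by
  induction l with
  | nil => rfl
  | cons a t ih =>
    cases t with
    | nil => simp [PySem.Str.join, PySem.Chars.join, pvCat, List.intercalate]
    | cons b t' =>
      rw [pvCat_cons, ← ih]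
      simp [PySem.Str.join, PySem.Chars.join_cons_cons]

theorem pvJoin_sp (xs : List String) :
    PySem.Str.join " " (xs ++ ["0"]) = pvCat (xs.map (· ++ " ")) ++ "0" := by
  induction xs with
  | nil => simp [PySem.Str.join, PySem.Chars.join, pvCat, List.intercalate]
  | cons x t ih =>
    obtain ⟨b, t', hb⟩ : ∃ b t', t ++ ["0"] = b :: t' := by cases t <;> exact ⟨_, _, rfl⟩
    rw [List.cons_append, List.map_cons, pvCat_cons]
    rw [hb] at ih ⊢
    simp only [PySem.Str.join, List.map_cons] at ih ⊢
    rw [PySem.Chars.join_cons_cons, String.ofList_append, String.ofList_append, ih,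
      String.ofList_toList, show String.ofList " ".toList = " " from rfl, String.append_assoc,
      String.append_assoc, String.append_assoc]

theorem pvFilter_beq {t : Int} (L : List Int) (h : L.Nodup) :
    L.filter (fun l => t == l) = if t ∈ L then [t] else [] := by
  induction L with
  | nil => simp
  | cons x T ih =>
    rcases List.nodup_cons.mp h with ⟨hx, hT⟩
    by_cases he : t = x
    · subst he
      simp only [List.filter_cons, beq_self_eq_true, if_pos, List.mem_cons, true_or]
      rw [List.filter_eq_nil_iff.mpr (fun a ha => by simp; rintro rfl; exact hx ha)]
    · rw [List.filter_cons, if_neg (by simp [he]), ih hT]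
      simp [List.mem_cons, he]

theorem pvMap_ite (L : List Int) (p : Int → Prop) [DecidablePred p] (g : Int → String) :
    pvCat (L.map fun x => if p x then g x else "") = pvCat ((L.filter (fun x => decide (p x))).map g) := by
  induction L with
  | nil => rfl
  | cons a t ih =>
    by_cases h : p a
    · rw [List.map_cons, pvCat_cons, if_pos h, List.filter_cons, if_pos (by simpa using h),
        List.map_cons, pvCat_cons, ih]
    · rw [List.map_cons, pvCat_cons, if_neg h, List.filter_cons, if_neg (by simpa using h), ih,
        String.empty_append]

theorem pvRange_filter_lt (i n : Int) (hi : 1 ≤ i) :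
    (PySem.List.pyRange (i+1) (n+1) 1).filter (fun j => decide (j < n + 1 - i))
      = PySem.List.pyRange (i+1) (n+1-i) 1 := by
  by_cases h : n + 1 - i ≤ i + 1
  · rw [PySem.List.pyRange_one_eq_nil h, List.filter_eq_nil_iff.mpr]
    intro a ha
    have := (PySem.List.mem_pyRange_one.mp ha).1
    simp only [decide_eq_true_eq]
    omega
  · rw [not_le] at h
    rw [PySem.List.pyRange_one_append (i+1) (n+1-i) (n+1) (le_of_lt h) (by omega), List.filter_append,
      List.filter_eq_self.mpr (fun a ha => by
        have := (PySem.List.mem_pyRange_one.mp ha).2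
        simp only [decide_eq_true_eq]
        omega),
      List.filter_eq_nil_iff.mpr (fun a ha => by
        have := (PySem.List.mem_pyRange_one.mp ha).1
        simp only [decide_eq_true_eq]
        omega),
      List.append_nil]

theorem formeInjective_pos (i j k : Int) (hi : 1 ≤ i) : formeInjective i j k = schurLit k i j := by
  unfold formeInjective schurLit
  rw [if_neg (by omega)]

theorem formeInjective_neg (i m k : Int) (hi : 1 ≤ i) (hm : 1 ≤ m) :
    formeInjective (-i) (-m) k = -(schurLit k i m) := by
  unfold formeInjective schurLit
  rw [if_pos (by omega)]
  simp only [abs_neg, abs_of_pos (show (0:Int) < i by omega), abs_of_pos (show (0:Int) < m by omega)]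
  ring

-- The canonical clause strings (B's literal formulas).
def pvT1 (k i j m : Int) : String :=
  PySem.Int.toStr (-(schurLit k i m)) ++ " " ++ PySem.Int.toStr (-(schurLit k j m)) ++ " " ++
    PySem.Int.toStr (-(schurLit k (i+j) m)) ++ " 0\n"
def pvG1m (k i j : Int) : String := pvCat ((PySem.List.pyRange 1 (k+1) 1).map (pvT1 k i j))
def pvG1 (k n i : Int) : String := pvCat ((PySem.List.pyRange (i+1) (n+1-i) 1).map (fun j => pvG1m k i j))
def pvG2 (k i : Int) : String :=
  pvCat ((PySem.List.pyRange 1 (k+1) 1).map (fun j => PySem.Int.toStr (schurLit k i j) ++ " ")) ++ "0\n"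
def pvT3 (k i j l : Int) : String :=
  PySem.Int.toStr (-(schurLit k i j)) ++ " " ++ PySem.Int.toStr (-(schurLit k i l)) ++ " 0\n"
def pvG3 (k i : Int) : String :=
  pvCat ((PySem.List.pyRange 1 (k+1) 1).map (fun j =>
    pvCat ((PySem.List.pyRange (j+1) (k+1) 1).map (fun l => pvT3 k i j l))))

theorem pvA1 (k n : Int) (s : String) :
    (PySem.List.pyRange 1 (n + 1) 1).foldl (fun clauses i =>
      (PySem.List.pyRange (i + 1) (n + 1) 1).foldl (fun clauses j =>
        (PySem.List.pyRange (j + 1) (n + 1) 1).foldl (fun clauses l =>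
          if i + j == l then
            (PySem.List.pyRange 1 (k + 1) 1).foldl (fun clauses m =>
              clauses ++ PySem.Int.toStr (formeInjective (-i) (-m) k) ++ " " ++
                PySem.Int.toStr (formeInjective (-j) (-m) k) ++ " " ++
                PySem.Int.toStr (formeInjective (-l) (-m) k) ++ " 0\n") clauses
          else clauses) clauses) clauses) s
    = s ++ pvCat ((PySem.List.pyRange 1 (n + 1) 1).map (pvG1 k n)) := by
  apply pvStrfold_shape
  intro s i hmi
  have hi1 : 1 ≤ i := (PySem.List.mem_pyRange_one.mp hmi).1
  rw [pvStrfold_shape _ (fun j => if j < n + 1 - i then pvG1m k i j else "") _ ?_ s]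
  · rw [pvMap_ite, pvRange_filter_lt i n hi1, pvG1]
  · intro s j hmj
    beta_reduce
    have hj1 : i + 1 ≤ j := (PySem.List.mem_pyRange_one.mp hmj).1
    rw [PySem.List.foldl_if_eq_foldl_filter (fun l => i + j == l) _ _ _,
      pvFilter_beq _ (PySem.List.nodup_pyRange_one _ _)]
    by_cases hc : i + j ∈ PySem.List.pyRange (j + 1) (n + 1) 1
    · have hcc := PySem.List.mem_pyRange_one.mp hc
      rw [if_pos hc, List.foldl_cons, List.foldl_nil,
        pvStrfold_shape _ (pvT1 k i j) _ ?hm s]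
      case hm =>
        intro s m hmm
        beta_reduce
        have hm1 : 1 ≤ m := (PySem.List.mem_pyRange_one.mp hmm).1
        simp only [pvT1]
        rw [formeInjective_neg i m k hi1 hm1, formeInjective_neg j m k (by omega) hm1,
          formeInjective_neg (i+j) m k (by omega) hm1]
        simp [String.append_assoc]
      have hlt : j < n + 1 - i := by omega
      simp [hlt, pvG1m]
    · have hlt : ¬ (j < n + 1 - i) := fun hlt => hc (PySem.List.mem_pyRange_one.mpr (by omega))
      simp [hc, hlt]

theorem pvA2 (k n : Int) (s : String) :
    (PySem.List.pyRange 1 (n + 1) 1).foldl (fun clauses i =>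
      clauses ++ ((PySem.List.pyRange 1 (k + 1) 1).foldl (fun clause j =>
        clause ++ PySem.Int.toStr (formeInjective i j k) ++ " ") "") ++ "0\n") s
    = s ++ pvCat ((PySem.List.pyRange 1 (n + 1) 1).map (pvG2 k)) := by
  apply pvStrfold_shape
  intro s i hmi
  have hi1 : 1 ≤ i := (PySem.List.mem_pyRange_one.mp hmi).1
  rw [pvStrfold_shape _ (fun j => PySem.Int.toStr (schurLit k i j) ++ " ") _ ?_ ""]
  · rw [pvG2, String.empty_append, String.append_assoc]
  · intro s j hmj
    beta_reduce
    rw [formeInjective_pos i j k hi1, String.append_assoc]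

theorem pvA3 (k n : Int) (s : String) :
    (PySem.List.pyRange 1 (n + 1) 1).foldl (fun clauses i =>
      (PySem.List.pyRange 1 (k + 1) 1).foldl (fun clauses j =>
        (PySem.List.pyRange (j + 1) (k + 1) 1).foldl (fun clauses l =>
          clauses ++ PySem.Int.toStr (-formeInjective i j k) ++ " " ++
            PySem.Int.toStr (-formeInjective i l k) ++ " 0\n") clauses) clauses) s
    = s ++ pvCat ((PySem.List.pyRange 1 (n + 1) 1).map (pvG3 k)) := by
  apply pvStrfold_shape
  intro s i hmi
  have hi1 : 1 ≤ i := (PySem.List.mem_pyRange_one.mp hmi).1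
  rw [pvStrfold_shape _ (fun j => pvCat ((PySem.List.pyRange (j+1) (k+1) 1).map (fun l => pvT3 k i j l))) _ ?_ s]
  · rw [pvG3]
  · intro s j hmj
    beta_reduce
    rw [pvStrfold_shape _ (fun l => pvT3 k i j l) _ ?_ s]
    intro s l hml
    beta_reduce
    simp only [pvT3]
    rw [formeInjective_pos i j k hi1, formeInjective_pos i l k hi1]
    simp [String.append_assoc]

theorem pvA_eq (k n : Int) : generate_schur_sat_instance k n =
    pvCat ((PySem.List.pyRange 1 (n + 1) 1).map (pvG1 k n)) ++
      (pvCat ((PySem.List.pyRange 1 (n + 1) 1).map (pvG2 k)) ++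
        pvCat ((PySem.List.pyRange 1 (n + 1) 1).map (pvG3 k))) := by
  simp only [generate_schur_sat_instance]
  rw [pvA1, pvA2, pvA3, String.empty_append, String.append_assoc]

theorem pvB_eq (k n : Int) : generate_schur_sat_instance_alt k n =
    pvCat ((PySem.List.pyRange 1 (n + 1) 1).map (pvG1 k n)) ++
      (pvCat ((PySem.List.pyRange 1 (n + 1) 1).map (pvG2 k)) ++
        pvCat ((PySem.List.pyRange 1 (n + 1) 1).map (pvG3 k))) := by
  simp only [generate_schur_sat_instance_alt]
  rw [pvListfold_shape _ (fun i => (PySem.List.pyRange (i + 1) (n + 1 - i) 1).flatMap (fun j =>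
        (PySem.List.pyRange 1 (k + 1) 1).map (pvT1 k i j))) _ ?hb1 []]
  case hb1 =>
    intro s i _
    beta_reduce
    rw [pvListfold_shape _ (fun j => (PySem.List.pyRange 1 (k + 1) 1).map (pvT1 k i j)) _ ?_ s]
    intro s j _
    exact PySem.List.foldl_append_singleton_eq_map (pvT1 k i j) _ s
  rw [pvListfold_shape _ (fun i => [PySem.Str.join " "
      (((PySem.List.pyRange 1 (k + 1) 1).map (fun j => PySem.Int.toStr (schurLit k i j))) ++ ["0"]) ++ "\n"]) _
      (fun s i _ => rfl) _]
  rw [pvListfold_shape _ (fun i => (PySem.List.pyRange 1 (k + 1) 1).flatMap (fun j =>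
        (PySem.List.pyRange (j + 1) (k + 1) 1).map (pvT3 k i j))) _ ?hb3 _]
  case hb3 =>
    intro s i _
    beta_reduce
    rw [pvListfold_shape _ (fun j => (PySem.List.pyRange (j + 1) (k + 1) 1).map (pvT3 k i j)) _ ?_ s]
    intro s j _
    exact PySem.List.foldl_append_singleton_eq_map (pvT3 k i j) _ s
  rw [pvJoin_empty_eq_cat, List.nil_append, pvCat_append, pvCat_append,
    pvCat_flatMap, pvCat_flatMap, pvCat_flatMap]
  have h1 : ∀ i ∈ PySem.List.pyRange 1 (n + 1) 1,
      pvCat ((PySem.List.pyRange (i + 1) (n + 1 - i) 1).flatMap (fun j =>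
        (PySem.List.pyRange 1 (k + 1) 1).map (pvT1 k i j))) = pvG1 k n i := by
    intro i _
    rw [pvCat_flatMap, pvG1]
    exact congrArg pvCat (List.map_congr_left (fun j _ => by rw [pvG1m]))
  have h2 : ∀ i ∈ PySem.List.pyRange 1 (n + 1) 1,
      pvCat [PySem.Str.join " "
        (((PySem.List.pyRange 1 (k + 1) 1).map (fun j => PySem.Int.toStr (schurLit k i j))) ++ ["0"]) ++ "\n"]
        = pvG2 k i := by
    intro i _
    rw [pvCat_cons, pvJoin_sp, List.map_map, pvG2, show pvCat ([] : List String) = "" from rfl,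
      String.append_empty, String.append_assoc, show ("0" ++ "\n" : String) = "0\n" from rfl]
    rfl
  have h3 : ∀ i ∈ PySem.List.pyRange 1 (n + 1) 1,
      pvCat ((PySem.List.pyRange 1 (k + 1) 1).flatMap (fun j =>
        (PySem.List.pyRange (j + 1) (k + 1) 1).map (pvT3 k i j))) = pvG3 k i := by
    intro i _
    rw [pvCat_flatMap, pvG3]
  rw [List.map_congr_left h1, List.map_congr_left h2, List.map_congr_left h3]
  rw [String.append_assoc]

-- ===== VERDICT (by name: the statement is the Claim_ definition above) =====
theorem generate_schur_sat_instance_spec : Claim_equal_generate_schur_sat_instance := by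
  intro k n _
  unfold Spec_generate_schur_sat_instance
  rw [pvA_eq, pvB_eq]
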